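-- pv_equiv track=rewrite | github.com/MarkSon-42/Team_ALGO | hyungjoon/프로그래머스/레벨 1/230613_프로그래머스_133502_햄버거 만들기/solved.py | solution
-- ===== SOURCE A (Python) =====
-- def solution(ingredient):
--     answer = 0
--
--     stack = []
--     for i in ingredient:
--         stack.append(i)
--         if len(stack) >= 4:
--             if stack[len(stack)-4] == 1 and \
--                 stack[len(stack)-3] == 2 and \
--                 stack[len(stack)-2] == 3 and \
--                 stack[len(stack)-1] == 1:
--                 answer += 1
--                 del stack[len(stack)-4:len(stack)]
--
--     return answer
-- ===== SOURCE B (Python) =====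
-- def solution(ingredient):
--     lst = list(ingredient)
--     answer = 0
--     while True:
--         for i in range(len(lst) - 3):
--             if lst[i:i+4] == [1, 2, 3, 1]:
--                 del lst[i:i+4]
--                 answer += 1
--                 break
--         else:
--             return answer
-- ===== Notes on version B (the rewrite author's own statement) =====
-- stated objective: alternative
-- what changed: Replaces A's single-pass stack scan with repeated leftmost find-and-remove of the [1,2,3,1] slice on a copy of the input list, restarting the scan after each removal.
import Mathlib
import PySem

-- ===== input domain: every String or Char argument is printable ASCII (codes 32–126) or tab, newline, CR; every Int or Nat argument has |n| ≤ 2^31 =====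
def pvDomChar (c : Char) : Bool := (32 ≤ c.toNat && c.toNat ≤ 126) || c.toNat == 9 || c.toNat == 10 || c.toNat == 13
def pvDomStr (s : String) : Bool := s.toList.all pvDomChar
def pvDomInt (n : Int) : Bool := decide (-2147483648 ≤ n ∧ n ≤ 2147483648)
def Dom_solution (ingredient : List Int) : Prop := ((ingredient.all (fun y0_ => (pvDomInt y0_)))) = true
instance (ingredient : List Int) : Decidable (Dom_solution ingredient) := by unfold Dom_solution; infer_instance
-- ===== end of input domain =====

-- B replaces A's single-pass stack scan with repeated leftmost find-and-remove of the
-- [1,2,3,1] slice on a copy of the list (alternative decomposition; not faster).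

-- ===== PORT A =====
-- literal port of A: foldl over the input with state (answer, stack);
-- 'del stack[len-4:len]' is ported as keeping the first len-4 elements (take).
def solution (ingredient : List Int) : Int :=
  (ingredient.foldl (fun (st : Int × List Int) i =>
      let stack := st.2 ++ [i]
      if stack.length ≥ 4 ∧
         PySem.List.pyGet? stack ((stack.length : Int) - 4) = some 1 ∧
         PySem.List.pyGet? stack ((stack.length : Int) - 3) = some 2 ∧
         PySem.List.pyGet? stack ((stack.length : Int) - 2) = some 3 ∧
         PySem.List.pyGet? stack ((stack.length : Int) - 1) = some 1
      then (st.1 + 1, stack.take (stack.length - 4))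
      else (st.1, stack))
    ((0 : Int), ([] : List Int))).1

-- ===== PORT B =====
-- the inner for-loop of Source B: index of the leftmost window equal to [1,2,3,1]
def findPat : List Int → Option Nat
  | [] => none
  | x :: t => if (x :: t).take 4 = [1, 2, 3, 1] then some 0 else (findPat t).map (· + 1)

theorem findPat_le_length : ∀ (l : List Int) (i : Nat), findPat l = some i → i + 4 ≤ l.length := by
  intro l
  induction l with
  | nil => intro i h; simp [findPat] at h
  | cons x t ih =>
    intro i h
    simp only [findPat] at h
    split at h
    · rename_i hp
      cases h
      have hlen := congrArg List.length hp
      simp only [List.length_take, List.length_cons] at hlen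
      simp only [List.length_cons]
      omega
    · rcases Option.map_eq_some_iff.mp h with ⟨j, hj, rfl⟩
      have := ih j hj
      simp only [List.length_cons]
      omega

-- the outer while-loop of Source B: delete the slice, count, repeat
def altGo (lst : List Int) : Int :=
  match h : findPat lst with
  | none => 0
  | some i => 1 + altGo (lst.take i ++ lst.drop (i + 4))
termination_by lst.length
decreasing_by
  have := findPat_le_length lst i h
  simp [List.length_take, List.length_drop]
  omega

def solution_alt (ingredient : List Int) : Int := altGo ingredient

-- ===== PRECONDITION & SPEC =====
def Spec_solution (ingredient : List Int) (out : Int) : Prop := out = solution_alt ingredient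
instance (ingredient : List Int) (out : Int) : Decidable (Spec_solution ingredient out) := by unfold Spec_solution; infer_instance

-- ===== CLAIM (what is proved, stated in full; the proofs are below) =====
def Claim_equal_solution : Prop := ∀ (ingredient : List Int), Dom_solution ingredient → Spec_solution ingredient (solution ingredient)

-- ===== LEMMAS AND PROOFS =====

-- clean recursive stack machine; s is A's stack stored reversed
def run (s l : List Int) : Int :=
  match l with
  | [] => 0
  | i :: rest =>
    if i = 1 ∧ s.take 3 = [3, 2, 1] then 1 + run (s.drop 3) rest
    else run (i :: s) rest

-- "l contains no [1,2,3,1] window"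
def NoWin (l : List Int) : Prop := ∀ a b : List Int, l ≠ a ++ [1, 2, 3, 1] ++ b

theorem nowin_of_findPat_none (l : List Int) (h : findPat l = none) : NoWin l := by
  intro a
  induction a generalizing l with
  | nil =>
    intro b hl
    subst hl
    simp [findPat] at h
  | cons x a' ih =>
    intro b hl
    subst hl
    simp only [List.cons_append, findPat] at h
    split at h
    · simp at h
    · exact ih (a' ++ [1, 2, 3, 1] ++ b) (Option.map_eq_none_iff.mp h) b rfl

theorem findPat_none_of_nowin (l : List Int) (h : NoWin l) : findPat l = none := by
  induction l with
  | nil => rfl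
  | cons x t ih =>
    simp only [findPat]
    have hc : ¬ (x :: t).take 4 = [1, 2, 3, 1] := by
      intro hp
      exact h [] ((x :: t).drop 4) (by rw [← List.take_append_drop 4 (x :: t), hp]; simp)
    rw [if_neg hc, ih (fun a b hab => h (x :: a) b (by simp [hab]))]
    rfl

theorem findPat_append_none (p r : List Int) (h : findPat (p ++ r) = none) : findPat p = none := by
  refine findPat_none_of_nowin p (fun a b hab => ?_)
  exact nowin_of_findPat_none _ h a (b ++ r) (by simp [hab])

theorem findPat_snoc_none (p : List Int) (i : Int) (h : findPat p = none)
    (h2 : ¬ (i = 1 ∧ p.reverse.take 3 = [3, 2, 1])) : findPat (p ++ [i]) = none := by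
  refine findPat_none_of_nowin _ (fun a b hab => ?_)
  rcases List.eq_nil_or_concat b with rfl | ⟨b', j, rfl⟩
  · -- window ends at the appended element: p ends with [1,2,3] and i = 1
    have hab' : p ++ [i] = (a ++ [1, 2, 3]) ++ [1] := by rw [hab]; simp
    obtain ⟨hp, hi⟩ := List.append_inj' hab' rfl
    have hi' : i = 1 := by injection hi
    exact h2 ⟨hi', by rw [hp]; simp⟩
  · -- window lies inside p
    have hab' : p ++ [i] = (a ++ [1, 2, 3, 1] ++ b') ++ [j] := by
      simpa [List.concat_eq_append] using hab
    obtain ⟨hp, _⟩ := List.append_inj' hab' rfl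
    exact nowin_of_findPat_none p h a b' hp

theorem findPat_pattern (p q : List Int) (h : findPat (p ++ [1, 2, 3]) = none) :
    findPat (p ++ [1, 2, 3, 1] ++ q) = some p.length := by
  induction p with
  | nil => simp [findPat]
  | cons x t ih =>
    simp only [List.cons_append, findPat] at h ⊢
    split at h
    · simp at h
    · rename_i hc
      have h' : findPat (t ++ [1, 2, 3]) = none := Option.map_eq_none_iff.mp h
      have hagree : (x :: (t ++ [1, 2, 3, 1] ++ q)).take 4 = (x :: (t ++ [1, 2, 3])).take 4 := by
        have e1 : x :: (t ++ [1, 2, 3, 1] ++ q) = (x :: (t ++ [1, 2, 3])) ++ (1 :: q) := by simp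
        rw [e1, List.take_append_of_le_length (by simp)]
      rw [if_neg (by rw [hagree]; exact hc), ih h']
      simp

theorem altGo_none (l : List Int) (h : findPat l = none) : altGo l = 0 := by
  rw [altGo]; split <;> simp_all

theorem altGo_pattern (p q : List Int) (h : findPat (p ++ [1, 2, 3]) = none) :
    altGo (p ++ [1, 2, 3, 1] ++ q) = 1 + altGo (p ++ q) := by
  have hf := findPat_pattern p q h
  rw [altGo]
  split
  · rename_i h0; rw [h0] at hf; cases hf
  · rename_i i h0
    rw [h0] at hf
    injection hf with hi
    subst hi
    congr 1
    have htake : (p ++ [1, 2, 3, 1] ++ q).take p.length = p := by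
      rw [List.append_assoc, List.take_append_of_le_length (le_refl _)]
      simp
    have hdrop : (p ++ [1, 2, 3, 1] ++ q).drop (p.length + 4) = q := by
      have : p.length + 4 = (p ++ [1, 2, 3, 1]).length := by simp
      rw [this, List.drop_left]
    rw [htake, hdrop]

theorem run_eq_altGo (l : List Int) : ∀ (s : List Int), findPat s.reverse = none →
    run s l = altGo (s.reverse ++ l) := by
  induction l with
  | nil => intro s h; simp [run, altGo_none _ h]
  | cons i rest ih =>
    intro s h
    rw [run]
    split
    · rename_i hc
      obtain ⟨hi, ht⟩ := hc
      subst hi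
      have hs : s = [3, 2, 1] ++ s.drop 3 := by
        conv_lhs => rw [← List.take_append_drop 3 s]
        rw [ht]
      have hrev : s.reverse = (s.drop 3).reverse ++ [1, 2, 3] := by
        conv_lhs => rw [hs]; simp
      have h' : findPat ((s.drop 3).reverse ++ [1, 2, 3]) = none := by rw [← hrev]; exact h
      have hq : s.reverse ++ (1 :: rest) = (s.drop 3).reverse ++ [1, 2, 3, 1] ++ rest := by
        rw [hrev]; simp
      rw [hq, altGo_pattern _ _ h']
      rw [ih (s.drop 3) (findPat_append_none _ _ h')]
    · rename_i hc
      have h' : findPat (s.reverse ++ [i]) = none :=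
        findPat_snoc_none _ _ h (by simpa using hc)
      have : s.reverse ++ (i :: rest) = (i :: s).reverse ++ rest := by simp
      rw [this, ih (i :: s) (by simpa using h')]

theorem foldl_eq_run (l : List Int) : ∀ (a : Int) (r : List Int),
    (l.foldl (fun (st : Int × List Int) i =>
      let stack := st.2 ++ [i]
      if stack.length ≥ 4 ∧
         PySem.List.pyGet? stack ((stack.length : Int) - 4) = some 1 ∧
         PySem.List.pyGet? stack ((stack.length : Int) - 3) = some 2 ∧
         PySem.List.pyGet? stack ((stack.length : Int) - 2) = some 3 ∧
         PySem.List.pyGet? stack ((stack.length : Int) - 1) = some 1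
      then (st.1 + 1, stack.take (stack.length - 4))
      else (st.1, stack)) (a, r.reverse)).1 = a + run r l := by
  induction l with
  | nil => intro a r; simp [run]
  | cons i rest ih =>
    intro a r
    rw [List.foldl_cons, run]
    rcases r with _ | ⟨a1, r1⟩
    · rw [if_neg (by simp), if_neg (by simp)]
      exact ih a [i]
    rcases r1 with _ | ⟨a2, r2⟩
    · rw [if_neg (by simp), if_neg (by simp)]
      exact ih a [i, a1]
    rcases r2 with _ | ⟨a3, r3⟩
    · rw [if_neg (by simp), if_neg (by simp [List.take])]
      exact ih a [i, a1, a2]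
    · -- stack = r3.reverse ++ [a3, a2, a1, i]
      have hst : (a1 :: a2 :: a3 :: r3).reverse ++ [i] = r3.reverse ++ [a3, a2, a1, i] := by simp
      have hlen : (r3.reverse ++ [a3, a2, a1, i]).length = r3.length + 4 := by simp
      have e4 : PySem.List.pyGet? (r3.reverse ++ [a3, a2, a1, i])
          (((r3.reverse ++ [a3, a2, a1, i]).length : Int) - 4) = some a3 := by
        rw [hlen]
        have : ((r3.length + 4 : Nat) : Int) - 4 = ((r3.length : Nat) : Int) := by push_cast; ring
        rw [this, PySem.List.pyGet?_natCast]
        rw [show r3.length = r3.reverse.length by simp,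
          List.getElem?_append_right (le_refl _)]
        simp
      have e3 : PySem.List.pyGet? (r3.reverse ++ [a3, a2, a1, i])
          (((r3.reverse ++ [a3, a2, a1, i]).length : Int) - 3) = some a2 := by
        rw [hlen]
        have : ((r3.length + 4 : Nat) : Int) - 3 = (((r3.length + 1 : Nat)) : Int) := by push_cast; ring
        rw [this, PySem.List.pyGet?_natCast]
        rw [List.getElem?_append_right (by simp)]
        simp
      have e2 : PySem.List.pyGet? (r3.reverse ++ [a3, a2, a1, i])
          (((r3.reverse ++ [a3, a2, a1, i]).length : Int) - 2) = some a1 := by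
        rw [hlen]
        have : ((r3.length + 4 : Nat) : Int) - 2 = (((r3.length + 2 : Nat)) : Int) := by push_cast; ring
        rw [this, PySem.List.pyGet?_natCast]
        rw [List.getElem?_append_right (by simp)]
        simp
      have e1 : PySem.List.pyGet? (r3.reverse ++ [a3, a2, a1, i])
          (((r3.reverse ++ [a3, a2, a1, i]).length : Int) - 1) = some i := by
        rw [hlen]
        have : ((r3.length + 4 : Nat) : Int) - 1 = (((r3.length + 3 : Nat)) : Int) := by push_cast; ring
        rw [this, PySem.List.pyGet?_natCast]
        rw [List.getElem?_append_right (by simp)]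
        simp
      by_cases hcond : i = 1 ∧ a1 = 3 ∧ a2 = 2 ∧ a3 = 1
      · obtain ⟨hi, h1, h2, h3⟩ := hcond
        rw [if_pos, if_pos ⟨hi, by simp [h1, h2, h3]⟩]
        · have htake : ((a1 :: a2 :: a3 :: r3).reverse ++ [i]).take
              (((a1 :: a2 :: a3 :: r3).reverse ++ [i]).length - 4) = r3.reverse := by
            rw [hst, hlen]
            rw [show r3.length + 4 - 4 = r3.reverse.length by simp, List.take_left]
          simp only [htake]
          have := ih (a + 1) r3
          rw [this]
          simp only [List.drop_succ_cons, List.drop_zero]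
          ring
        · rw [hst]
          refine ⟨by rw [hlen]; omega, ?_, ?_, ?_, ?_⟩
          · rw [e4, h3]
          · rw [e3, h2]
          · rw [e2, h1]
          · rw [e1, hi]
      · have hcond' : ¬ (i = 1 ∧ (a1 :: a2 :: a3 :: r3).take 3 = [3, 2, 1]) := by
          intro ⟨hi, hl⟩
          have hl' : a1 = 3 ∧ a2 = 2 ∧ a3 = 1 := by simpa using hl
          exact hcond ⟨hi, hl'.1, hl'.2.1, hl'.2.2⟩
        rw [if_neg, if_neg hcond']
        · have : (a1 :: a2 :: a3 :: r3).reverse ++ [i] = (i :: a1 :: a2 :: a3 :: r3).reverse := by simp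
          rw [this]
          exact ih a (i :: a1 :: a2 :: a3 :: r3)
        · rw [hst]
          intro ⟨_, c4, c3, c2, c1⟩
          rw [e4] at c4; rw [e3] at c3; rw [e2] at c2; rw [e1] at c1
          exact hcond ⟨by injection c1, by injection c2, by injection c3, by injection c4⟩

-- ===== VERDICT (by name: the statement is the Claim_ definition above) =====
theorem solution_spec : Claim_equal_solution := by
  intro ingredient _
  unfold Spec_solution solution solution_alt
  have h1 := foldl_eq_run ingredient 0 []
  simp only [List.reverse_nil] at h1
  rw [h1, run_eq_altGo ingredient [] (by simp [findPat])]
  simp
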